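-- pv_equiv track=rewrite | github.com/brickgao/leetcode | Valid_Sudoku.py | isValidLine
-- ===== SOURCE A (Python) =====
-- def isValidLine(line):
--     rec_set = set()
--     for num in line:
--         if num == '.':
--             continue
--         if num in rec_set:
--             return False
--         else:
--             rec_set.add(num)
--     return True
-- ===== SOURCE B (Python) =====
-- def isValidLine(line):
--     digits = sorted(num for num in line if num != '.')
--     return all(a != b for a, b in zip(digits, digits[1:]))
-- ===== Notes on version B (the rewrite author's own statement) =====
-- stated objective: alternative
-- what changed: Replaces the seen-set membership loop with sort-then-adjacent-scan: filter out '.', sort, and report a duplicate iff two consecutive sorted entries are equal.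
import Mathlib
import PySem

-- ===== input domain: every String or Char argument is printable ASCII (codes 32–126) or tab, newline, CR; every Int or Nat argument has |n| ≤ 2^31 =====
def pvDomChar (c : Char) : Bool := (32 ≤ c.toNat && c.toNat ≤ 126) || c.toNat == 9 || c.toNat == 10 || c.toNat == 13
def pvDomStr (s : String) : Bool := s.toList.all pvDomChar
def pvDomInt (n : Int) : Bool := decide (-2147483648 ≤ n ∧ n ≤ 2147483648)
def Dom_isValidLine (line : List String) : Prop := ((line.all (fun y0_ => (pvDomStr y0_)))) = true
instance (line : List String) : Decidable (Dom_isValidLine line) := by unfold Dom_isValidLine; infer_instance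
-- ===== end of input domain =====

-- B replaces A's seen-set membership loop by sort-then-adjacent-scan (alternative decomposition, not faster).
-- ===== PORT A =====
def isValidLineLoop : List String → PySem.Set String → Bool
  | [], _ => true
  | num :: rest, recSet =>
    if num = "." then isValidLineLoop rest recSet
    else if PySem.Set.contains recSet num then false
    else isValidLineLoop rest (PySem.Set.add recSet num)

def isValidLine (line : List String) : Bool :=
  isValidLineLoop line PySem.Set.empty

-- ===== PORT B =====
-- all(a != b for a, b in zip(digits, digits[1:])): adjacent-pair scan
def noAdjEq : List String → Bool
  | [] => true
  | [_] => true
  | a :: b :: t => if a = b then false else noAdjEq (b :: t)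

def isValidLine_alt (line : List String) : Bool :=
  noAdjEq (PySem.List.sorted (line.filter (fun num => num ≠ ".")) (fun x => x) false)

-- ===== PRECONDITION & SPEC =====
def Spec_isValidLine (line : List String) (out : Bool) : Prop := out = isValidLine_alt line
instance (line : List String) (out : Bool) : Decidable (Spec_isValidLine line out) := by unfold Spec_isValidLine; infer_instance

-- ===== CLAIM (what is proved, stated in full; the proofs are below) =====
def Claim_equal_isValidLine : Prop := ∀ (line : List String), Dom_isValidLine line → Spec_isValidLine line (isValidLine line)

-- ===== LEMMAS AND PROOFS =====
theorem loopA_iff (xs : List String) : ∀ (s : PySem.Set String),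
    (isValidLineLoop xs s = true ↔
      ((xs.filter (fun num => num ≠ ".")).Nodup ∧
        ∀ x ∈ xs.filter (fun num => num ≠ "."), x ∉ s)) := by
  induction xs with
  | nil => intro s; simp [isValidLineLoop]
  | cons a t ih =>
    intro s
    by_cases ha : a = "."
    · simp [isValidLineLoop, ha, ih]
    · simp only [isValidLineLoop, if_neg ha]
      by_cases hc : a ∈ s
      · rw [if_pos (by simpa [PySem.Set.contains_iff] using hc)]
        constructor
        · intro h; exact absurd h (by simp)
        · rintro ⟨-, hmem⟩
          exact ((hmem a (by simp [List.mem_filter, ha])) hc).elim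
      · rw [if_neg (by simpa [PySem.Set.contains_iff] using hc)]
        rw [ih]
        simp only [List.filter_cons, decide_eq_true_eq]
        rw [if_pos (by simpa using ha)]
        simp only [List.nodup_cons, List.mem_cons]
        constructor
        · rintro ⟨hnd, hmem⟩
          refine ⟨⟨fun hin => (hmem a hin) (by simp [PySem.Set.mem_add]), hnd⟩, ?_⟩
          rintro x hx
          rcases hx with rfl | hx
          · exact hc
          · intro hxs
            exact (hmem x hx) (by simp [PySem.Set.mem_add, hxs])
        · rintro ⟨⟨hna, hnd⟩, hmem⟩
          refine ⟨hnd, fun x hx hxs => ?_⟩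
          rw [PySem.Set.mem_add] at hxs
          rcases hxs with hxs | rfl
          · exact (hmem x (Or.inr hx)) hxs
          · exact hna hx

theorem noAdjEq_iff_chain : ∀ (l : List String), (noAdjEq l = true ↔ l.IsChain (· ≠ ·)) := by
  intro l
  induction l with
  | nil => simp [noAdjEq]
  | cons a t ih =>
    cases t with
    | nil => simp [noAdjEq]
    | cons b u =>
      rw [List.isChain_cons_cons]
      simp only [noAdjEq]
      by_cases hab : a = b
      · simp [hab]
      · simp [hab, ih, Ne]

theorem sorted_chain_iff_nodup : ∀ (l : List String), l.Pairwise (· ≤ ·) →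
    (l.IsChain (· ≠ ·) ↔ l.Nodup) := by
  intro l
  induction l with
  | nil => simp
  | cons a t ih =>
    intro hp
    rw [List.pairwise_cons] at hp
    obtain ⟨hle, hpt⟩ := hp
    cases t with
    | nil => simp
    | cons b u =>
      rw [List.isChain_cons_cons, ih hpt]
      constructor
      · rintro ⟨hab, hnd⟩
        refine List.nodup_cons.mpr ⟨?_, hnd⟩
        have halt : a < b := lt_of_le_of_ne (hle b (by simp)) hab
        intro hmem
        rcases List.mem_cons.mp hmem with rfl | hmem
        · exact hab rfl
        · have : b ≤ a := (List.pairwise_cons.mp hpt).1 a hmem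
          exact absurd (lt_of_lt_of_le halt this) (lt_irrefl a)
      · intro hnd
        obtain ⟨hna, hnd2⟩ := List.nodup_cons.mp hnd
        exact ⟨fun h => hna (by simp [h]), hnd2⟩

theorem alt_iff (line : List String) :
    (isValidLine_alt line = true ↔ (line.filter (fun num => num ≠ ".")).Nodup) := by
  unfold isValidLine_alt
  have hperm : (PySem.List.sorted (line.filter (fun num => num ≠ ".")) (fun x => x) false).Perm
      (line.filter (fun num => num ≠ ".")) := PySem.List.sorted_perm _ _ _
  have hp : (PySem.List.sorted (line.filter (fun num => num ≠ ".")) (fun x => x) false).Pairwise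
      (· ≤ ·) := PySem.List.sorted_pairwise (line.filter (fun num => num ≠ ".")) (fun x => x)
  rw [noAdjEq_iff_chain, sorted_chain_iff_nodup _ hp, hperm.nodup_iff]

-- ===== VERDICT (by name: the statement is the Claim_ definition above) =====
theorem isValidLine_spec : Claim_equal_isValidLine := by
  intro line _
  unfold Spec_isValidLine
  rw [Bool.eq_iff_iff]
  unfold isValidLine
  rw [loopA_iff, alt_iff]
  simp [PySem.Set.empty]
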